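-- pv_equiv track=rewrite | github.com/black-magic-studios/math-sdk | games/0_0_alchemy/optimize_reel_placement.py | count_adjacency_in_window
-- ===== SOURCE A (Python) =====
-- from collections import defaultdict
-- from typing import List, Dict, Tuple
--
-- def count_adjacency_in_window(window: List[str]) -> Dict[str, int]:
--     """Count vertical adjacency pairs in a 7-symbol window."""
--     pairs = defaultdict(int)
--     for i in range(len(window) - 1):
--         if window[i] == window[i + 1]:
--             pairs[window[i]] += 1
--         # Also count wild adjacency to any symbol
--         if window[i] == 'W' or window[i + 1] == 'W':
--             if window[i] != window[i + 1]:
--                 pairs['W_adj'] += 1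
--     return pairs
-- ===== SOURCE B (Python) =====
-- from collections import defaultdict
-- from itertools import groupby
-- from typing import List, Dict
--
-- def count_adjacency_in_window(window: List[str]) -> Dict[str, int]:
--     """Count vertical adjacency pairs in a symbol window (run-length decomposition)."""
--     pairs = defaultdict(int)
--     runs = [(s, sum(1 for _ in g)) for s, g in groupby(window)]
--     for idx, (s, length) in enumerate(runs):
--         if length >= 2:
--             pairs[s] += length - 1
--         if idx + 1 < len(runs):
--             nxt = runs[idx + 1][0]
--             if (s == 'W') != (nxt == 'W'):
--                 pairs['W_adj'] += 1
--     return pairs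
-- ===== Notes on version B (the rewrite author's own statement) =====
-- stated objective: alternative
-- what changed: Replaces the index-by-index scan over window[i],window[i+1] with a run-length decomposition (itertools.groupby): each run of symbol s and length L contributes L-1 to pairs[s] at once, and each run boundary contributes one W_adj exactly when the two run symbols' W-ness differs (XOR).
import Mathlib
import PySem

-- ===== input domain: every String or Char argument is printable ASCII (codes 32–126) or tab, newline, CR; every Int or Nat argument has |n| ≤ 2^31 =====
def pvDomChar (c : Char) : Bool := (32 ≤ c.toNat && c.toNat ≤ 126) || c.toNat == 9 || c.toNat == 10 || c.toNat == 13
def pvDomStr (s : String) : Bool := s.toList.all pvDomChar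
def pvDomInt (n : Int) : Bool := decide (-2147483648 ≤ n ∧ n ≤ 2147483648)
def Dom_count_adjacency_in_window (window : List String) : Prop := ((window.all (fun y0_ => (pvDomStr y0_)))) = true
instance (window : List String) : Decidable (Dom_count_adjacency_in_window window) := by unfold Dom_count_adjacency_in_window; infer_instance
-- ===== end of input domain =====

-- B replaces A's index scan by a run-length (groupby) decomposition: same values, same order; objective: alternative.

-- ===== PORT A =====
-- loop body of A for index i: pairs[w[i]] += 1 on equality; pairs['W_adj'] += 1 when one side is 'W' and they differ
def aStep (w : List String) (d : PySem.Dict String Int) (i : Int) : PySem.Dict String Int :=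
  let a := PySem.List.pyGetD w i ""
  let b := PySem.List.pyGetD w (i + 1) ""
  let d1 := if a = b then d.modify a 0 (· + 1) else d
  if a = "W" ∨ b = "W" then (if a ≠ b then d1.modify "W_adj" 0 (· + 1) else d1) else d1

def count_adjacency_in_window (window : List String) : List (String × Int) :=
  ((PySem.List.pyRange 0 ((window.length : Int) - 1) 1).foldl (aStep window) PySem.Dict.empty).items

-- ===== PORT B =====
-- hand-ported itertools.groupby over equality: the list of consecutive runs (symbol, length); exact
def pvRuns : List String → List (String × Nat)
  | [] => []
  | x :: xs =>
    match pvRuns xs with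
    | [] => [(x, 1)]
    | (s, k) :: t => if x = s then (s, k + 1) :: t else (x, 1) :: (s, k) :: t

-- the loop over enumerate(runs): bump pairs[s] by L-1 for L >= 2, bump 'W_adj' at each boundary with XOR'd W-ness
def pvRunFold (d : PySem.Dict String Int) : List (String × Nat) → PySem.Dict String Int
  | [] => d
  | (s, L) :: rest =>
    let d1 := if 2 ≤ L then d.modify s 0 (· + ((L : Int) - 1)) else d
    let d2 := match rest with
      | [] => d1
      | (s2, _) :: _ => if decide (s = "W") != decide (s2 = "W") then d1.modify "W_adj" 0 (· + 1) else d1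
    pvRunFold d2 rest

def count_adjacency_in_window_alt (window : List String) : List (String × Int) :=
  (pvRunFold PySem.Dict.empty (pvRuns window)).items

-- ===== PRECONDITION & SPEC =====
def Spec_count_adjacency_in_window (window : List String) (out : List (String × Int)) : Prop := out = count_adjacency_in_window_alt window
instance (window : List String) (out : List (String × Int)) : Decidable (Spec_count_adjacency_in_window window out) := by unfold Spec_count_adjacency_in_window; infer_instance

-- ===== CLAIM (what is proved, stated in full; the proofs are below) =====
def Claim_equal_count_adjacency_in_window : Prop := ∀ (window : List String), Dom_count_adjacency_in_window window → Spec_count_adjacency_in_window window (count_adjacency_in_window window)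

-- ===== LEMMAS AND PROOFS =====

-- A's body, as a function of the two adjacent values
def pvStep (d : PySem.Dict String Int) (a b : String) : PySem.Dict String Int :=
  let d1 := if a = b then d.modify a 0 (· + 1) else d
  if a = "W" ∨ b = "W" then (if a ≠ b then d1.modify "W_adj" 0 (· + 1) else d1) else d1

-- structural-recursion form of A's loop (over adjacent pairs)
def pvPairFold (d : PySem.Dict String Int) : List String → PySem.Dict String Int
  | [] => d
  | [_] => d
  | a :: b :: t => pvPairFold (pvStep d a b) (b :: t)

lemma pvRunFold_cons (d : PySem.Dict String Int) (s : String) (L : Nat) (rest : List (String × Nat)) :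
    pvRunFold d ((s, L) :: rest) =
      pvRunFold
        (match rest with
          | [] => (if 2 ≤ L then d.modify s 0 (· + ((L : Int) - 1)) else d)
          | (s2, _) :: _ =>
            if decide (s = "W") != decide (s2 = "W") then
              (if 2 ≤ L then d.modify s 0 (· + ((L : Int) - 1)) else d).modify "W_adj" 0 (· + 1)
            else (if 2 ≤ L then d.modify s 0 (· + ((L : Int) - 1)) else d))
        rest := rfl

lemma aStep_cons_succ (x : String) (w : List String) (d : PySem.Dict String Int) (k : Nat) :
    aStep (x :: w) d (1 + (k : Int)) = aStep w d (k : Int) := by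
  have e1 : PySem.List.pyGetD (x :: w) (1 + (k : Int)) "" = PySem.List.pyGetD w (k : Int) "" := by
    rw [show (1 + (k : Int)) = ((k + 1 : Nat) : Int) by push_cast; ring,
        PySem.List.pyGetD_natCast, PySem.List.pyGetD_natCast]
    simp [List.getD]
  have e2 : PySem.List.pyGetD (x :: w) (1 + (k : Int) + 1) "" = PySem.List.pyGetD w ((k : Int) + 1) "" := by
    rw [show (1 + (k : Int) + 1) = ((k + 2 : Nat) : Int) by push_cast; ring,
        show ((k : Int) + 1) = ((k + 1 : Nat) : Int) by push_cast; ring,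
        PySem.List.pyGetD_natCast, PySem.List.pyGetD_natCast]
    simp [List.getD]
  simp only [aStep, e1, e2]

lemma foldl_aStep_eq_pairFold (w : List String) (d : PySem.Dict String Int) :
    (PySem.List.pyRange 0 ((w.length : Int) - 1) 1).foldl (aStep w) d = pvPairFold d w := by
  induction w generalizing d with
  | nil =>
    rw [PySem.List.pyRange_one_eq_nil (by norm_num)]; rfl
  | cons x xs ih =>
    cases xs with
    | nil =>
      rw [show ((([x] : List String).length : Int) - 1) = 0 by simp,
          PySem.List.pyRange_one_eq_nil le_rfl]; rfl
    | cons y t =>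
      have hlen : (((x :: y :: t).length : Nat) : Int) - 1 = ((t.length + 1 : Nat) : Int) := by
        simp
      rw [hlen, PySem.List.pyRange_one_cons (by positivity)]
      have hshift : PySem.List.pyRange (0 + 1) ((t.length + 1 : Nat) : Int) 1
          = (PySem.List.pyRange 0 (((y :: t).length : Int) - 1) 1).map (fun j => 1 + j) := by
        rw [show ((0 : Int) + 1) = 1 by ring, PySem.List.pyRange_one 1, PySem.List.pyRange_one 0,
            List.map_map]
        rw [show (((t.length + 1 : Nat) : Int) - 1).toNat = t.length by omega,
            show (((((y :: t).length : Nat) : Int) - 1) - 0).toNat = t.length by simp]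
        apply List.map_congr_left; intro k _
        simp
      rw [List.foldl_cons, hshift, List.foldl_map,
          PySem.List.foldl_congr_mem _ _ (aStep (y :: t)) _
            (by
              intro d' j hj
              rcases PySem.List.mem_pyRange_one.mp hj with ⟨hj0, _⟩
              obtain ⟨m, rfl⟩ := Int.eq_ofNat_of_zero_le hj0
              exact aStep_cons_succ x (y :: t) d' m),
          ih]
      have hx0 : PySem.List.pyGetD (x :: y :: t) 0 "" = x := by
        simp [PySem.List.pyGetD_zero_cons]
      have hy1 : PySem.List.pyGetD (x :: y :: t) (0 + 1) "" = y := by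
        rw [show ((0 : Int) + 1) = ((1 : Nat) : Int) by norm_num, PySem.List.pyGetD_natCast]
        simp [List.getD]
      have h0 : aStep (x :: y :: t) d 0 = pvStep d x y := by
        simp only [aStep, pvStep, hx0, hy1]
      rw [h0]; rfl

lemma modify_modify_add (d : PySem.Dict String Int) (k : String) (a b : Int) :
    (d.modify k 0 (· + a)).modify k 0 (· + b) = d.modify k 0 (· + (a + b)) := by
  simp only [PySem.Dict.modify, PySem.Dict.getD_insert_self, PySem.Dict.insert_insert_self]
  congr 1; ring

lemma runs_cons_shape (y : String) (t : List String) :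
    ∃ k rest, pvRuns (y :: t) = (y, k) :: rest ∧ 1 ≤ k := by
  cases h : pvRuns t with
  | nil => exact ⟨1, [], by simp [pvRuns, h], le_refl 1⟩
  | cons p r =>
    obtain ⟨s, k⟩ := p
    by_cases hy : y = s
    · subst hy; exact ⟨k + 1, r, by simp [pvRuns, h], by omega⟩
    · exact ⟨1, (s, k) :: r, by simp [pvRuns, h, hy], le_refl 1⟩

lemma runFold_absorb (d : PySem.Dict String Int) (y : String) (k : Nat)
    (rest : List (String × Nat)) (hk : 1 ≤ k) :
    pvRunFold d ((y, k + 1) :: rest) = pvRunFold (d.modify y 0 (· + 1)) ((y, k) :: rest) := by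
  have hd1 : (if 2 ≤ k + 1 then d.modify y 0 (· + (((k + 1 : Nat) : Int) - 1)) else d)
      = (if 2 ≤ k then (d.modify y 0 (· + 1)).modify y 0 (· + (((k : Nat) : Int) - 1))
         else d.modify y 0 (· + 1)) := by
    by_cases h2 : 2 ≤ k
    · rw [if_pos (by omega), if_pos h2, modify_modify_add]
      congr 1; funext v; push_cast; ring
    · have hk1 : k = 1 := by omega
      subst hk1
      norm_num
  rw [pvRunFold_cons, pvRunFold_cons]
  cases rest with
  | nil => rw [hd1]
  | cons p r => rw [hd1]

lemma pairFold_eq_runFold (x : String) (xs : List String) (d : PySem.Dict String Int) :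
    pvPairFold d (x :: xs) = pvRunFold d (pvRuns (x :: xs)) := by
  induction xs generalizing d x with
  | nil => rfl
  | cons y t ih =>
    obtain ⟨k, rest, hg, hk⟩ := runs_cons_shape y t
    by_cases hxy : x = y
    · subst hxy
      have hgx : pvRuns (x :: x :: t) = (x, k + 1) :: rest := by
        simp only [pvRuns] at hg ⊢
        rw [hg]
        simp
      rw [hgx, runFold_absorb _ _ _ _ hk, ← hg,
          show pvPairFold d (x :: x :: t) = pvPairFold (pvStep d x x) (x :: t) from rfl,
          show pvStep d x x = d.modify x 0 (· + 1) by simp [pvStep]]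
      exact ih x _
    · have hgx : pvRuns (x :: y :: t) = (x, 1) :: (y, k) :: rest := by
        simp only [pvRuns] at hg ⊢
        rw [hg]
        simp [hxy]
      have hrf : pvRunFold d ((x, 1) :: (y, k) :: rest)
          = pvRunFold (pvStep d x y) ((y, k) :: rest) := by
        rw [pvRunFold_cons]
        congr 1
        rw [if_neg (by omega : ¬ (2 ≤ 1))]
        by_cases hx : x = "W" <;> by_cases hy : y = "W" <;>
          simp_all [pvStep]
      rw [show pvPairFold d (x :: y :: t) = pvPairFold (pvStep d x y) (y :: t) from rfl,
          ih y, hgx, hrf, hg]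

-- ===== VERDICT (by name: the statement is the Claim_ definition above) =====
theorem count_adjacency_in_window_spec : Claim_equal_count_adjacency_in_window := by
  intro window _
  show count_adjacency_in_window window = count_adjacency_in_window_alt window
  unfold count_adjacency_in_window count_adjacency_in_window_alt
  rw [foldl_aStep_eq_pairFold]
  cases window with
  | nil => rfl
  | cons x xs => rw [pairFold_eq_runFold]
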